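-- pv_equiv track=rewrite | github.com/kinegratii/borax | borax/counters/serial_pool.py | serial_no_generator
-- ===== SOURCE A (Python) =====
-- from itertools import chain
-- from typing import List, Union, Iterable, Generator, Optional, Callable
--
-- def serial_no_generator(lower: int = 0, upper: int = 10, reused: bool = True, values: Iterable[int] = None) -> \
--         Generator[int, None, None]:
--     values = values or []
--     eset = set(filter(lambda x: lower <= x < upper, values))
--     if eset:
--         max_val = max(eset)
--         if reused:
--             gen = chain(range(max_val + 1, upper), range(lower, max_val))
--         else:
--             gen = range(max_val + 1, upper)
--     else:
--         gen = range(lower, upper)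
--     for ele in gen:
--         if ele in eset:
--             continue
--         yield ele
-- ===== SOURCE B (Python) =====
-- def serial_no_generator(lower: int = 0, upper: int = 10, reused: bool = True, values=None):
--     # Sorted-gap walk: emit the gaps between consecutive used values,
--     # never testing membership of an individual candidate.
--     used = sorted({x for x in (values or []) if lower <= x < upper})
--     if not used:
--         yield from range(lower, upper)
--         return
--     m = used[-1]
--     yield from range(m + 1, upper)
--     if reused:
--         start = lower
--         for v in used:
--             yield from range(start, v)
--             start = v + 1
-- ===== Notes on version B (the rewrite author's own statement) =====
-- stated objective: alternative
-- what changed: B sorts the in-range used values and emits the gaps between consecutive used values (range(m+1,upper), then for reused the runs range(start,v) walking the sorted list), so no per-candidate membership test against a set is performed, unlike A's filter of chained ranges.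
import Mathlib
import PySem

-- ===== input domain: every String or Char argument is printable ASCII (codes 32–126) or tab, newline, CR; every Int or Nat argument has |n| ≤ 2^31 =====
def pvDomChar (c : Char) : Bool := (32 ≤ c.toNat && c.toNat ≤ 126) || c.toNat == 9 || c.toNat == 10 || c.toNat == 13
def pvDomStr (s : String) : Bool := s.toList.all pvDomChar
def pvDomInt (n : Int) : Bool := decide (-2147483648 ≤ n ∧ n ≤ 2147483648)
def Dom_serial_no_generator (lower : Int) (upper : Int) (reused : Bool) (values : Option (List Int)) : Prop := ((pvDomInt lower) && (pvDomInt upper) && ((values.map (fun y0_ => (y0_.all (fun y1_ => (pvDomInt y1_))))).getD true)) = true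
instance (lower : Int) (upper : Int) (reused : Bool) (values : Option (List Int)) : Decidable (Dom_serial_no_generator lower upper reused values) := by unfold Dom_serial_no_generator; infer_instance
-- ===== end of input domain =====

-- B sorts the in-range used values once and emits the gaps between consecutive used values
-- (a sorted-gap walk, no per-candidate membership test), instead of A's chained ranges
-- filtered by set membership; same output, a different algorithm.


-- ===== PORT A =====
def serial_no_generator (lower : Int) (upper : Int) (reused : Bool) (values : Option (List Int)) : List Int :=
  -- values = values or []
  let vals : List Int := values.getD []
  -- eset = set(filter(lambda x: lower <= x < upper, values))
  let eset : PySem.Set Int :=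
    PySem.Set.ofList (vals.filter (fun x => decide (lower ≤ x) && decide (x < upper)))
  -- if eset: max_val = max(eset); gen = … else gen = range(lower, upper)
  let gen : List Int :=
    match PySem.List.max? eset (fun x => x) with
    | some max_val =>
        if reused then
          PySem.List.pyRange (max_val + 1) upper 1 ++ PySem.List.pyRange lower max_val 1
        else
          PySem.List.pyRange (max_val + 1) upper 1
    | none => PySem.List.pyRange lower upper 1
  -- for ele in gen: if ele in eset: continue; yield ele
  gen.foldl (fun acc ele => if PySem.Set.contains eset ele then acc else acc ++ [ele]) []

-- ===== PORT B =====
def serial_no_generator_alt (lower : Int) (upper : Int) (reused : Bool) (values : Option (List Int)) : List Int :=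
  -- used = sorted({x for x in (values or []) if lower <= x < upper})
  let used : List Int :=
    PySem.List.sorted
      (PySem.Set.ofList ((values.getD []).filter (fun x => decide (lower ≤ x) && decide (x < upper))))
      (fun x => x) false
  match used.getLast? with
  | none =>
      -- if not used: yield from range(lower, upper)
      PySem.List.pyRange lower upper 1
  | some m =>
      -- m = used[-1]; yield from range(m+1, upper); then the gaps below m if reused
      PySem.List.pyRange (m + 1) upper 1 ++
        (if reused then
          (used.foldl
            (fun (st : Int × List Int) v => (v + 1, st.2 ++ PySem.List.pyRange st.1 v 1))
            (lower, [])).2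
        else [])

-- ===== PRECONDITION & SPEC =====
def Spec_serial_no_generator (lower : Int) (upper : Int) (reused : Bool) (values : Option (List Int)) (out : List Int) : Prop := out = serial_no_generator_alt lower upper reused values
instance (lower : Int) (upper : Int) (reused : Bool) (values : Option (List Int)) (out : List Int) : Decidable (Spec_serial_no_generator lower upper reused values out) := by unfold Spec_serial_no_generator; infer_instance

-- ===== CLAIM (what is proved, stated in full; the proofs are below) =====
def Claim_equal_serial_no_generator : Prop := ∀ (lower : Int) (upper : Int) (reused : Bool) (values : Option (List Int)), Dom_serial_no_generator lower upper reused values → Spec_serial_no_generator lower upper reused values (serial_no_generator lower upper reused values)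

-- ===== LEMMAS AND PROOFS =====

-- A's yield loop ('if ele in eset: continue') is a filter by non-membership.
theorem loop_eq_filter (e : List Int) (l : List Int) :
    l.foldl (fun acc ele => if PySem.Set.contains e ele then acc else acc ++ [ele]) [] =
    l.filter (fun x => !PySem.Set.contains e x) := by
  have h : (fun (acc : List Int) ele => if PySem.Set.contains e ele then acc else acc ++ [ele])
      = (fun (acc : List Int) ele => if (!PySem.Set.contains e ele) then acc ++ [ele] else acc) := by
    funext acc ele; cases PySem.Set.contains e ele <;> simp
  rw [h, PySem.List.foldl_append_if_eq_filter]; simp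

-- the last element of a strictly increasing list bounds every element
theorem last_is_max (l : List Int) (m : Int) (hp : l.Pairwise (· < ·))
    (hl : l.getLast? = some m) : ∀ x ∈ l, x ≤ m := by
  induction l with
  | nil => simp at hl
  | cons a t ih =>
    intro x hx
    cases t with
    | nil =>
      simp at hl hx; omega
    | cons b u =>
      have hl' : (b :: u).getLast? = some m := by
        simpa [List.getLast?_cons_cons] using hl
      have hp' := List.pairwise_cons.mp hp
      have hbm : ∀ y ∈ b :: u, y ≤ m := ih hp'.2 hl'
      rcases List.mem_cons.mp hx with rfl | hx'
      · have hb : x < b := hp'.1 b (by simp)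
        have := hbm b (by simp); omega
      · exact hbm x hx'

-- a range entirely below/at every excluded element survives / a range of excluded elements is removed
theorem filter_range_keep (p : Int → Bool) (a b : Int) (h : ∀ x, a ≤ x → x < b → p x = true) :
    (PySem.List.pyRange a b 1).filter p = PySem.List.pyRange a b 1 := by
  apply List.filter_eq_self.mpr
  intro x hx
  have hb := PySem.List.mem_pyRange_one.mp hx
  exact h x hb.1 hb.2

-- B's gap walk over a strictly increasing list equals the filtered range up to its last element
theorem gap_walk (us : List Int) :
    us.Pairwise (· < ·) →
    ∀ (start : Int) (acc : List Int) (m : Int),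
    (∀ v ∈ us, start ≤ v) → us.getLast? = some m →
    (us.foldl (fun (st : Int × List Int) v => (v + 1, st.2 ++ PySem.List.pyRange st.1 v 1))
      (start, acc)).2
    = acc ++ (PySem.List.pyRange start m 1).filter (fun x => !decide (x ∈ us)) := by
  induction us with
  | nil => intro _ start acc m _ hl; simp at hl
  | cons v rest ih =>
    intro hp start acc m hlb hl
    have hp' := List.pairwise_cons.mp hp
    cases rest with
    | nil =>
      have hvm : m = v := by simpa using hl.symm
      subst hvm
      simp only [List.foldl_cons, List.foldl_nil]
      rw [filter_range_keep _ start m (fun x h1 h2 => by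
        simp only [Bool.not_eq_true', decide_eq_false_iff_not, List.mem_singleton]; omega)]
    | cons b u =>
      have hl' : (b :: u).getLast? = some m := by
        simpa [List.getLast?_cons_cons] using hl
      have hvb : v < b := hp'.1 b (by simp)
      have hbm : b ≤ m := last_is_max _ _ hp'.2 hl' b (by simp)
      have hlb' : ∀ w ∈ b :: u, v + 1 ≤ w := fun w hw => by
        have := hp'.1 w hw; omega
      have hstep : (List.foldl (fun (st : Int × List Int) v => (v + 1, st.2 ++ PySem.List.pyRange st.1 v 1))
          (start, acc) (v :: b :: u))
          = List.foldl (fun (st : Int × List Int) v => (v + 1, st.2 ++ PySem.List.pyRange st.1 v 1))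
          (v + 1, acc ++ PySem.List.pyRange start v 1) (b :: u) := by
        simp [List.foldl_cons]
      rw [hstep, ih hp'.2 (v + 1) (acc ++ PySem.List.pyRange start v 1) m hlb' hl']
      have hsv : start ≤ v := hlb v (by simp)
      -- split the range [start, m) at v + 1
      rw [PySem.List.pyRange_one_append start (v + 1) m (by omega) (by omega), List.filter_append]
      -- low chunk [start, v+1): v is removed, everything below v survives
      have hlow : (PySem.List.pyRange start (v + 1) 1).filter (fun x => !decide (x ∈ v :: b :: u))
          = PySem.List.pyRange start v 1 := by
        rw [PySem.List.pyRange_one_append start v (v + 1) hsv (by omega), List.filter_append]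
        rw [filter_range_keep _ start v (fun x h1 h2 => by
          have hx : x ∉ v :: b :: u := by
            intro hmem
            rcases List.mem_cons.mp hmem with rfl | hmem'
            · omega
            · have := hp'.1 x hmem'; omega
          simp [hx])]
        have : PySem.List.pyRange v (v + 1) 1 = [v] := by
          simp [PySem.List.pyRange_one_cons (show v < v + 1 by omega)]
        rw [this]
        simp
      -- high chunk [v+1, m): v is not there, membership reduces to the tail
      have hhigh : (PySem.List.pyRange (v + 1) m 1).filter (fun x => !decide (x ∈ v :: b :: u))
          = (PySem.List.pyRange (v + 1) m 1).filter (fun x => !decide (x ∈ b :: u)) := by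
        apply List.filter_congr
        intro x hx
        have hb := PySem.List.mem_pyRange_one.mp hx
        have : x ≠ v := by omega
        simp [List.mem_cons, this]
      rw [hlow, hhigh, List.append_assoc]

-- 'max(nonempty)' is some value
theorem max?_cons_isSome (a : Int) (t : List Int) :
    (PySem.List.max? (a :: t) (fun x => x)).isSome := by
  rw [PySem.List.max?_id_cons]; rfl

-- ===== VERDICT (by name: the statement is the Claim_ definition above) =====
theorem serial_no_generator_spec : Claim_equal_serial_no_generator := by
  intro lower upper reused values _dom
  unfold Spec_serial_no_generator serial_no_generator serial_no_generator_alt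
  simp only []
  set e : List Int :=
    PySem.Set.ofList ((values.getD []).filter (fun x => decide (lower ≤ x) && decide (x < upper)))
    with he
  set used : List Int := PySem.List.sorted e (fun x => x) false with hu
  have hmemu : ∀ x, x ∈ used ↔ x ∈ e := fun x => by
    rw [hu]; exact PySem.List.mem_sorted e (fun x => x) false x
  have hpw : used.Pairwise (· < ·) := by
    rw [hu, he]; exact PySem.List.sorted_ofList_pairwise_lt _
  have hrange : ∀ x ∈ e, lower ≤ x ∧ x < upper := by
    intro x hx
    rw [he, PySem.Set.mem_ofList] at hx
    simpa using (List.mem_filter.mp hx).2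
  cases hlast : used.getLast? with
  | none =>
    have hun : used = [] := List.getLast?_eq_none_iff.mp hlast
    have hen : e = [] := by
      rw [hu] at hun
      have := PySem.List.length_sorted e (fun x : Int => x) false
      rw [hun] at this
      simpa using this.symm
    rw [hen]
    simp only [PySem.List.max?]
    rw [loop_eq_filter]
    apply List.filter_eq_self.mpr
    intro x _
    simp [PySem.Set.contains]
  | some m =>
    -- m is max(e)
    have hme : m ∈ e := (hmemu m).mp (List.mem_of_getLast? hlast)
    have hmax : ∀ x ∈ e, x ≤ m := fun x hx =>
      last_is_max used m hpw hlast x ((hmemu x).mpr hx)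
    have hen : e ≠ [] := fun h => by simp [h] at hme
    obtain ⟨m0, hm0⟩ : ∃ m0, PySem.List.max? e (fun x => x) = some m0 := by
      cases h : PySem.List.max? e (fun x => x) with
      | none =>
        cases he2 : e with
        | nil => exact absurd he2 hen
        | cons a t =>
          rw [he2] at h
          exact absurd h (by
            have := max?_cons_isSome a t
            intro hc; rw [hc] at this; simp at this)
      | some m0 => exact ⟨m0, rfl⟩
    have hm0e : m0 ∈ e := PySem.List.max?_mem hm0
    have heq : m0 = m := le_antisymm (hmax m0 hm0e) (PySem.List.max?_isMax hm0 m hme)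
    rw [hm0, heq]
    have hnotmem_hi : (PySem.List.pyRange (m + 1) upper 1).filter
        (fun x => !PySem.Set.contains e x) = PySem.List.pyRange (m + 1) upper 1 := by
      apply filter_range_keep
      intro x h1 h2
      simp only [Bool.not_eq_true', PySem.Set.contains]
      rw [List.contains_eq_mem, decide_eq_false_iff_not]
      intro hx
      have := hmax x hx; omega
    cases reused with
    | false =>
      simp only [Bool.false_eq_true, if_false]
      rw [loop_eq_filter, List.append_nil, hnotmem_hi]
    | true =>
      simp only [if_true]
      rw [loop_eq_filter, List.filter_append, hnotmem_hi]
      congr 1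
      have hbounds := hrange m hme
      have hlb : ∀ v ∈ used, lower ≤ v := fun v hv => (hrange v ((hmemu v).mp hv)).1
      rw [gap_walk used hpw lower [] m hlb hlast]
      simp only [List.nil_append]
      apply List.filter_congr
      intro x _
      have : (x ∈ used) ↔ (x ∈ e) := hmemu x
      simp only [PySem.Set.contains]
      rw [List.contains_eq_mem]
      simp [this]
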